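-- pv_equiv track=rewrite | github.com/HunterAviator/OmniRemote | custom_components/omniremote/ir_encoder.py | _encode_jvc
-- ===== SOURCE A (Python) =====
-- def _encode_jvc(address: int, command: int) -> list[int]:
--     """Encode JVC protocol."""
--     timings = []
--
--     # Leader
--     timings.extend([8400, 4200])
--
--     # Address (8 bits, LSB first)
--     for bit in range(8):
--         timings.append(525)
--         if (address >> bit) & 1:
--             timings.append(1575)
--         else:
--             timings.append(525)
--
--     # Command (8 bits, LSB first)
--     for bit in range(8):
--         timings.append(525)
--         if (command >> bit) & 1:
--             timings.append(1575)
--         else: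
--             timings.append(525)
--
--     # End mark
--     timings.append(525)
--
--     return timings
-- ===== SOURCE B (Python) =====
-- _NIBBLE = [
--     [t for b in range(4) for t in (525, 1575 if n >> b & 1 else 525)]
--     for n in range(16)
-- ]
--
--
-- def _encode_jvc(address: int, command: int) -> list[int]:
--     """Encode JVC protocol by table lookup: four precomputed nibble timing blocks."""
--     a = address % 256
--     c = command % 256
--     return ([8400, 4200]
--             + _NIBBLE[a % 16] + _NIBBLE[a // 16]
--             + _NIBBLE[c % 16] + _NIBBLE[c // 16]
--             + [525])
-- ===== Notes on version B (the rewrite author's own statement) =====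
-- stated objective: alternative
-- what changed: Replaces A's per-bit accumulator loops with lookups in a precomputed 16-entry nibble timing table: each byte's timings come from two table indexings (low and high nibble of the byte) instead of eight conditional appends.
import Mathlib
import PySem

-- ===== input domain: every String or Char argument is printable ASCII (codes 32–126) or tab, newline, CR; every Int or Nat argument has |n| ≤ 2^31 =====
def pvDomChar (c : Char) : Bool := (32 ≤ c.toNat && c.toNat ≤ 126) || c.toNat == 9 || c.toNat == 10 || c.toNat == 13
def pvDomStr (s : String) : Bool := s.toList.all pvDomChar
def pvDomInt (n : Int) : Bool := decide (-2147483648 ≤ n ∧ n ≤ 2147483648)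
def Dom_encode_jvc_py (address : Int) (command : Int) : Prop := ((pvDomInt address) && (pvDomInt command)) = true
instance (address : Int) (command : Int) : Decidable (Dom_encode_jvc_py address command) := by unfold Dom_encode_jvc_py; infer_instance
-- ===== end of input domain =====

-- B replaces A's per-bit accumulator loops by lookups in a precomputed 16-entry
-- nibble timing table (objective: alternative data structure, same cost).

-- ===== PORT A =====
-- two accumulator loops over range(8), appending 525 then the conditional mark
def encode_jvc_py (address : Int) (command : Int) : List Int :=
  let timings : List Int := []
  let timings := timings ++ [8400, 4200]
  let timings := (PySem.List.pyRange 0 8 1).foldl (fun acc bit =>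
    let acc := acc ++ [525]
    if PySem.Int.band (address >>> bit.toNat) 1 ≠ 0 then acc ++ [1575] else acc ++ [525]) timings
  let timings := (PySem.List.pyRange 0 8 1).foldl (fun acc bit =>
    let acc := acc ++ [525]
    if PySem.Int.band (command >>> bit.toNat) 1 ≠ 0 then acc ++ [1575] else acc ++ [525]) timings
  timings ++ [525]

-- ===== PORT B =====
-- the module-level table _NIBBLE: for each n in range(16) the 8 timings of its 4 bits
def pvNIBBLE : List (List Int) :=
  (PySem.List.pyRange 0 16 1).map (fun n =>
    (PySem.List.pyRange 0 4 1).flatMap (fun b =>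
      [525, if PySem.Int.band (n >>> b.toNat) 1 ≠ 0 then 1575 else 525]))

-- _NIBBLE[i]: the index is always in range(16), so the .getD [] default never fires
def encode_jvc_py_alt (address : Int) (command : Int) : List Int :=
  let a := PySem.Int.mod address 256
  let c := PySem.Int.mod command 256
  [8400, 4200]
    ++ (PySem.List.pyGet? pvNIBBLE (PySem.Int.mod a 16)).getD []
    ++ (PySem.List.pyGet? pvNIBBLE (PySem.Int.floordiv a 16)).getD []
    ++ (PySem.List.pyGet? pvNIBBLE (PySem.Int.mod c 16)).getD []
    ++ (PySem.List.pyGet? pvNIBBLE (PySem.Int.floordiv c 16)).getD []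
    ++ [525]

-- ===== PRECONDITION & SPEC =====
def Spec_encode_jvc_py (address : Int) (command : Int) (out : List Int) : Prop := out = encode_jvc_py_alt address command
instance (address : Int) (command : Int) (out : List Int) : Decidable (Spec_encode_jvc_py address command out) := by unfold Spec_encode_jvc_py; infer_instance

-- ===== CLAIM (what is proved, stated in full; the proofs are below) =====
def Claim_equal_encode_jvc_py : Prop := ∀ (address : Int) (command : Int), Dom_encode_jvc_py address command → Spec_encode_jvc_py address command (encode_jvc_py address command)

-- ===== LEMMAS AND PROOFS =====

-- fold-with-append of one byte pass is the flatMap of its per-bit pairs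
theorem pv_fold (x : Int) (bits : List Int) (l : List Int) :
    bits.foldl (fun acc bit =>
      if PySem.Int.band (x >>> bit.toNat) 1 ≠ 0 then (acc ++ [525]) ++ [1575]
      else (acc ++ [525]) ++ [525]) l
    = l ++ bits.flatMap (fun bit =>
        [525, if PySem.Int.band (x >>> bit.toNat) 1 ≠ 0 then 1575 else 525]) := by
  induction bits generalizing l with
  | nil => simp
  | cons b bs ih =>
    simp only [List.foldl, List.flatMap_cons, ih]
    split <;> simp

-- A's 8-bit block of x depends only on x % 256, and on [0,256) it equals
-- B's two nibble-table lookups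
theorem pv_byte (x : Int) :
    (PySem.List.pyRange 0 8 1).flatMap (fun bit =>
        [525, if PySem.Int.band (x >>> bit.toNat) 1 ≠ 0 then 1575 else 525])
    = (PySem.List.pyGet? pvNIBBLE (PySem.Int.mod (PySem.Int.mod x 256) 16)).getD []
      ++ (PySem.List.pyGet? pvNIBBLE (PySem.Int.floordiv (PySem.Int.mod x 256) 16)).getD [] := by
  have hr : PySem.Int.mod x 256 = x % 256 := by
    simp [PySem.Int.mod, Int.fmod_eq_emod]
  set r : Int := x % 256 with hrdef
  have hr0 : 0 ≤ r := Int.emod_nonneg x (by norm_num)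
  have hr1 : r < 256 := Int.emod_lt_of_pos x (by norm_num)
  -- bits of x agree with bits of r for bit < 8
  have hb : ∀ k : Nat, k < 8 →
      PySem.Int.band (x >>> (k : Int)) 1 = PySem.Int.band (r >>> (k : Int)) 1 := by
    intro k hk
    rw [PySem.Int.band_one, PySem.Int.band_one,
        Int.shiftRight_natCast_right, Int.shiftRight_natCast_right]
    simp only [PySem.Int.mod, Int.fmod_eq_emod, Int.shiftRight_eq_div_pow]
    have hx : x = 256 * (x / 256) + r := by rw [hrdef]; omega
    interval_cases k <;> · rw [hx]; omega
  rw [hr]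
  have h8 : PySem.List.pyRange 0 8 1 = [0,1,2,3,4,5,6,7] := by decide
  rw [h8]
  simp only [List.flatMap_cons, List.flatMap_nil, List.append_nil]
  rw [hb ((0:Int).toNat) (by norm_num), hb ((1:Int).toNat) (by norm_num),
      hb ((2:Int).toNat) (by norm_num), hb ((3:Int).toNat) (by norm_num),
      hb ((4:Int).toNat) (by norm_num), hb ((5:Int).toNat) (by norm_num),
      hb ((6:Int).toNat) (by norm_num), hb ((7:Int).toNat) (by norm_num)]
  -- now everything depends only on r ∈ [0,256): finish by cases
  clear_value r
  clear hb hr hrdef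
  interval_cases r <;> rfl

-- ===== VERDICT (by name: the statement is the Claim_ definition above) =====
theorem encode_jvc_py_spec : Claim_equal_encode_jvc_py := by
  intro address command _
  show encode_jvc_py address command = encode_jvc_py_alt address command
  simp only [encode_jvc_py, encode_jvc_py_alt]
  rw [pv_fold, pv_fold, pv_byte address, pv_byte command]
  simp
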